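-- pv_equiv track=rewrite | github.com/srees16/centurion_core | rag_pipeline/ingestion/pdf_ingestion.py | _detect_indented_code_blocks
-- ===== SOURCE A (Python) =====
-- from typing import Any, Callable, Dict, List, Optional, Tuple, TypedDict
--
-- def _detect_indented_code_blocks(
--     lines: List[str],
--     min_indent: int = 2,
--     min_consecutive: int = 3,
-- ) -> List[Tuple[int, int]]:
--     """Find blocks of consistently indented lines (likely code).
--
--     Requires at least *min_consecutive* consecutive indented lines to
--     qualify as a code block.
--
--     Args:
--         lines: List of text lines.
--         min_indent: Minimum leading-space count to consider "indented".
--         min_consecutive: Minimum consecutive indented lines to form a block.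
--
--     Returns:
--         List of (start, end) line-index tuples.
--     """
--     blocks: List[Tuple[int, int]] = []
--     block_start: Optional[int] = None
--     count = 0
--
--     for i, line in enumerate(lines):
--         stripped = line.strip()
--         indent = len(line) - len(line.lstrip())
--
--         if indent >= min_indent and stripped:
--             if block_start is None:
--                 block_start = i
--             count += 1
--         elif not stripped:
--             # Blank lines inside a potential block — keep going
--             if block_start is not None:
--                 count += 0  # don't increment, but don't break
--         else:
--             # Non-indented, non-blank line — flush block
--             if block_start is not None and count >= min_consecutive:
--                 blocks.append((block_start, i - 1))
--             block_start = None
--             count = 0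
--
--     if block_start is not None and count >= min_consecutive:
--         blocks.append((block_start, len(lines) - 1))
--
--     return blocks
-- ===== SOURCE B (Python) =====
-- def _detect_indented_code_blocks(lines, min_indent=2, min_consecutive=3):
--     """Segment-wise rewrite: carve the line list at separator lines (non-blank,
--     indent < min_indent), then judge each segment at once."""
--     def is_sep(line):
--         return bool(line.strip()) and len(line) - len(line.lstrip()) < min_indent
--
--     def is_code(line):
--         return bool(line.strip()) and len(line) - len(line.lstrip()) >= min_indent
--
--     n = len(lines)
--     blocks = []
--     start = 0
--     while start < n:
--         cut = start
--         while cut < n and not is_sep(lines[cut]):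
--             cut += 1
--         seg = [k for k in range(start, cut) if is_code(lines[k])]
--         if seg and len(seg) >= min_consecutive:
--             blocks.append((seg[0], cut - 1))
--         start = cut + 1
--     return blocks
-- ===== Notes on version B (the rewrite author's own statement) =====
-- stated objective: alternative
-- what changed: A threads mutable block_start/count state line by line through one fold; B instead carves the line list into segments at separator lines (non-blank, under-indented) with an inner scan-to-next-separator loop and judges each whole segment via a filter of its indented line indices.
import Mathlib
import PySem

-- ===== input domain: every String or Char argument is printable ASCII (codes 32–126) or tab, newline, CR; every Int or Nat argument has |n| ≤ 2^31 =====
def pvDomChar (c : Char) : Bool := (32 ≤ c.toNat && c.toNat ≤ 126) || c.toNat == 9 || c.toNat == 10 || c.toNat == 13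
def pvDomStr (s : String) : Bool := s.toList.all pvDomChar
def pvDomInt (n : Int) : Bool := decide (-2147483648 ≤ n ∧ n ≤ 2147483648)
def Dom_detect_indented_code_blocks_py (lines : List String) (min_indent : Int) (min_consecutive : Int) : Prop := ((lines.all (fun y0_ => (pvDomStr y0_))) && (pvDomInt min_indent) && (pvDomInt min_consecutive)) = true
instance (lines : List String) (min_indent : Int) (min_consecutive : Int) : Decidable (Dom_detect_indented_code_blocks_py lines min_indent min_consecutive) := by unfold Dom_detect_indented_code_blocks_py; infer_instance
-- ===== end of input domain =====

-- B replaces A's line-by-line block_start/count state machine by carving the list into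
-- segments at separator lines and judging each whole segment at once (alternative decomposition).

-- ===== PORT A =====
-- The for-loop is the structural recursion aGo over (remaining lines, i, block_start, count,
-- blocks); its [] case is the trailing flush, where i = len(lines) so i - 1 = len(lines) - 1.
def aGo (mi mc : Int) : List String → Int → Option Int → Int → List (Int × Int) → List (Int × Int)
  | [], i, bs, cnt, acc =>
      match bs with
      | some b => if cnt ≥ mc then acc ++ [(b, i - 1)] else acc
      | none => acc
  | line :: rest, i, bs, cnt, acc =>
      let stripped := PySem.Str.strip line
      let indent : Int := (PySem.Str.len line : Int) - (PySem.Str.len (PySem.Str.lstrip line) : Int)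
      if indent ≥ mi ∧ stripped ≠ "" then
        aGo mi mc rest (i + 1) (match bs with | none => some i | some b => some b) (cnt + 1) acc
      else if stripped = "" then
        aGo mi mc rest (i + 1) bs cnt acc
      else
        aGo mi mc rest (i + 1) none 0
          (match bs with
           | some b => if cnt ≥ mc then acc ++ [(b, i - 1)] else acc
           | none => acc)

def detect_indented_code_blocks_py (lines : List String) (min_indent : Int) (min_consecutive : Int) : List (Int × Int) :=
  aGo min_indent min_consecutive lines 0 none 0 []

-- ===== PORT B =====
def bIsSep (mi : Int) (line : String) : Bool :=
  decide (PySem.Str.strip line ≠ "") &&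
    decide ((PySem.Str.len line : Int) - (PySem.Str.len (PySem.Str.lstrip line) : Int) < mi)

def bIsCode (mi : Int) (line : String) : Bool :=
  decide (PySem.Str.strip line ≠ "") &&
    decide ((PySem.Str.len line : Int) - (PySem.Str.len (PySem.Str.lstrip line) : Int) ≥ mi)

-- inner `while cut < n and not is_sep(lines[cut]): cut += 1`
def bFindCut (lines : List String) (mi : Int) (cut : Nat) : Nat :=
  if h : cut < lines.length ∧ bIsSep mi (lines.getD cut "") = false then
    bFindCut lines mi (cut + 1)
  else cut
termination_by lines.length - cut
decreasing_by omega

-- termination fact for bGo (the outer while advances: start := cut + 1 > start)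
theorem le_bFindCut (lines : List String) (mi : Int) (cut : Nat) : cut ≤ bFindCut lines mi cut := by
  fun_induction bFindCut <;> omega

-- outer `while start < n` loop of Source B
def bGo (lines : List String) (mi mc : Int) (start : Nat) : List (Int × Int) :=
  if _h : start < lines.length then
    let cut := bFindCut lines mi start
    let seg := (List.range' start (cut - start)).filter (fun k => bIsCode mi (lines.getD k ""))
    let rest := bGo lines mi mc (cut + 1)
    match seg with
    | [] => rest
    | k :: _ => if (seg.length : Int) ≥ mc then ((k : Int), (cut : Int) - 1) :: rest else rest
  else []
termination_by lines.length - start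
decreasing_by have := le_bFindCut lines mi start; omega

def detect_indented_code_blocks_py_alt (lines : List String) (min_indent : Int) (min_consecutive : Int) : List (Int × Int) :=
  bGo lines min_indent min_consecutive 0

-- ===== PRECONDITION & SPEC =====
def Spec_detect_indented_code_blocks_py (lines : List String) (min_indent : Int) (min_consecutive : Int) (out : List (Int × Int)) : Prop := out = detect_indented_code_blocks_py_alt lines min_indent min_consecutive
instance (lines : List String) (min_indent : Int) (min_consecutive : Int) (out : List (Int × Int)) : Decidable (Spec_detect_indented_code_blocks_py lines min_indent min_consecutive out) := by unfold Spec_detect_indented_code_blocks_py; infer_instance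

-- ===== CLAIM (what is proved, stated in full; the proofs are below) =====
def Claim_equal_detect_indented_code_blocks_py : Prop := ∀ (lines : List String) (min_indent : Int) (min_consecutive : Int), Dom_detect_indented_code_blocks_py lines min_indent min_consecutive → Spec_detect_indented_code_blocks_py lines min_indent min_consecutive (detect_indented_code_blocks_py lines min_indent min_consecutive)

-- ===== LEMMAS AND PROOFS =====

-- positions (absolute index) of the code lines of a segment
def posF (mi : Int) (s : Nat) : List String → List Nat
  | [] => []
  | x :: xs => if bIsCode mi x then s :: posF mi (s + 1) xs else posF mi (s + 1) xs

theorem segA (mi mc : Int) (seg : List String) (hfree : ∀ l ∈ seg, bIsSep mi l = false) :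
    ∀ (rest : List String) (s : Nat) (bs : Option Int) (cnt : Int) (acc : List (Int × Int)),
      aGo mi mc (seg ++ rest) (s : Int) bs cnt acc
        = aGo mi mc rest ((s : Int) + seg.length)
            (match bs with
             | some b => some b
             | none => (posF mi s seg).head?.map (fun k => (k : Int)))
            (cnt + (posF mi s seg).length) acc := by
  induction seg with
  | nil =>
    intro rest s bs cnt acc
    simp [posF]
    cases bs <;> simp
  | cons x xs ih =>
    intro rest s bs cnt acc
    have hx : bIsSep mi x = false := hfree x (by simp)
    have ihx := ih (fun l hl => hfree l (by simp [hl]))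
    simp only [bIsSep, Bool.and_eq_false_iff,
      decide_eq_false_iff_not, not_not, not_lt] at hx
    by_cases hc : bIsCode mi x = true
    · -- code line
      have hc' := hc
      simp only [bIsCode, Bool.and_eq_true, decide_eq_true_eq] at hc'
      simp only [List.cons_append, aGo]
      rw [if_pos ⟨hc'.2, hc'.1⟩]
      have : ((s : Int) + 1) = ((s + 1 : Nat) : Int) := by push_cast; ring
      rw [this, ihx rest (s + 1) (match bs with | none => some (s : Int) | some b => some b) (cnt + 1) acc]
      simp only [posF, hc, if_pos]
      cases bs <;> simp <;> congr 1 <;> ring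
    · -- blank line: bIsCode false and bIsSep false force strip = ""
      have hblank : PySem.Str.strip x = "" := by
        by_contra hne
        apply hc
        simp only [bIsCode, Bool.and_eq_true, decide_eq_true_eq]
        refine ⟨hne, ?_⟩
        rcases hx with h | h
        · exact absurd h hne
        · exact h
      simp only [List.cons_append, aGo]
      rw [if_neg (by simp [hblank]), if_pos hblank]
      have : ((s : Int) + 1) = ((s + 1 : Nat) : Int) := by push_cast; ring
      rw [this, ihx rest (s + 1) bs cnt acc]
      simp only [posF, hc]
      cases bs <;> simp <;> congr 1 <;> ring

theorem segSep (mi mc : Int) (x : String) (hx : bIsSep mi x = true) (rest : List String)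
    (i : Int) (bs : Option Int) (cnt : Int) (acc : List (Int × Int)) :
    aGo mi mc (x :: rest) i bs cnt acc
      = aGo mi mc rest (i + 1) none 0
          (match bs with
           | some b => if cnt ≥ mc then acc ++ [(b, i - 1)] else acc
           | none => acc) := by
  simp only [bIsSep, Bool.and_eq_true, decide_eq_true_eq] at hx
  simp only [aGo]
  rw [if_neg (by omega), if_neg hx.1]

theorem drop_head (lines : List String) (s : Nat) (x : String) (t : List String)
    (h : lines.drop s = x :: t) : lines.getD s "" = x ∧ lines.drop (s + 1) = t := by
  constructor
  · have h1 : (lines.drop s).head? = lines[s]? := List.head?_drop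
    rw [h] at h1
    simp [List.getD_eq_getElem?_getD, ← h1]
  · have h2 : (lines.drop s).tail = lines.drop (s + 1) := List.tail_drop
    rw [h] at h2
    simpa using h2.symm

theorem filtEq (lines : List String) (mi : Int) :
    ∀ (seg : List String) (s : Nat) (rest : List String), lines.drop s = seg ++ rest →
      (List.range' s seg.length).filter (fun k => bIsCode mi (lines.getD k "")) = posF mi s seg := by
  intro seg
  induction seg with
  | nil => intro s rest h; simp [posF]
  | cons x xs ih =>
    intro s rest h
    obtain ⟨h1, h2⟩ := drop_head lines s x (xs ++ rest) h
    simp only [List.length_cons, List.range'_succ, List.filter_cons, h1, posF]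
    rw [ih (s + 1) rest h2]

theorem findCutEq (lines : List String) (mi : Int) :
    ∀ s, bFindCut lines mi s = s + ((lines.drop s).takeWhile (fun l => !bIsSep mi l)).length := by
  intro s
  fun_induction bFindCut with
  | case1 cut h ih =>
    obtain ⟨hlt, hsep⟩ := h
    obtain ⟨x, t, hx⟩ : ∃ x t, lines.drop cut = x :: t := by
      have : lines.drop cut ≠ [] := by simp [List.drop_eq_nil_iff]; omega
      cases hd : lines.drop cut with
      | nil => exact absurd hd this
      | cons a b => exact ⟨a, b, rfl⟩
    obtain ⟨h1, h2⟩ := drop_head lines cut x t hx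
    rw [ih, hx, List.takeWhile_cons]
    rw [show (!bIsSep mi x) = true by rw [← h1, Bool.not_eq_true']; exact hsep]
    rw [h2]
    simp; omega
  | case2 cut h =>
    rcases Nat.lt_or_ge cut lines.length with hlt | hge
    · have hsep : bIsSep mi (lines.getD cut "") = true := by
        by_contra hc; exact h ⟨hlt, by simpa using hc⟩
      obtain ⟨x, t, hx⟩ : ∃ x t, lines.drop cut = x :: t := by
        have : lines.drop cut ≠ [] := by simp [List.drop_eq_nil_iff]; omega
        cases hd : lines.drop cut with
        | nil => exact absurd hd this
        | cons a b => exact ⟨a, b, rfl⟩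
      obtain ⟨h1, h2⟩ := drop_head lines cut x t hx
      rw [hx, List.takeWhile_cons]
      rw [← h1, hsep]
      simp
    · simp [List.drop_eq_nil_of_le hge]

theorem dropWhile_cons_prop {α : Type} (p : α → Bool) (l : List α) (x : α) (xs : List α)
    (h : l.dropWhile p = x :: xs) : p x = false := by
  induction l with
  | nil => simp at h
  | cons a t ih =>
    rw [List.dropWhile_cons] at h
    by_cases hp : p a = true
    · rw [if_pos hp] at h; exact ih h
    · rw [if_neg hp] at h
      cases h
      simpa using hp

theorem mainEq (lines : List String) (mi mc : Int) :
    ∀ (fuel s : Nat) (acc : List (Int × Int)), lines.length - s ≤ fuel →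
      aGo mi mc (lines.drop s) (s : Int) none 0 acc = acc ++ bGo lines mi mc s := by
  intro fuel
  induction fuel with
  | zero =>
    intro s acc hf
    rw [List.drop_eq_nil_of_le (by omega), bGo, dif_neg (by omega)]
    simp [aGo]
  | succ fuel ih =>
    intro s acc hf
    by_cases hs : s < lines.length
    · have hsplit := (List.takeWhile_append_dropWhile
        (p := fun l => !bIsSep mi l) (l := lines.drop s)).symm
      generalize hseg : (lines.drop s).takeWhile (fun l => !bIsSep mi l) = seg at *
      generalize hrest : (lines.drop s).dropWhile (fun l => !bIsSep mi l) = rest at *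
      have hfree : ∀ l ∈ seg, bIsSep mi l = false := by
        intro l hl
        have := List.mem_takeWhile_imp (hseg ▸ hl)
        simpa using this
      have hcut : bFindCut lines mi s = s + seg.length := by rw [findCutEq, hseg]
      have hposf := filtEq lines mi seg s rest hsplit
      have hsl : s + seg.length + rest.length = lines.length := by
        have := congrArg List.length hsplit
        simp at this
        omega
      have hdroprest : lines.drop (s + seg.length) = rest := by
        have h0 : (lines.drop s).drop seg.length = rest := by rw [hsplit, List.drop_left]
        rw [List.drop_drop] at h0
        exact h0
      rw [hsplit, segA mi mc seg hfree rest s none 0 acc]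
      rw [bGo, dif_pos hs]
      simp only [hcut, Nat.add_sub_cancel_left, hposf]
      cases hr : rest with
      | nil =>
        -- no separator below s: the segment runs to the end of the list
        subst hr
        have hlen : s + seg.length = lines.length := by simpa using hsl
        have hbend : bGo lines mi mc (s + seg.length + 1) = [] := by
          rw [bGo, dif_neg (by omega)]
        simp only [aGo, hbend]
        cases hp : posF mi s seg with
        | nil => simp
        | cons k tl =>
          simp only [List.length_cons, zero_add, List.head?_cons]
          split_ifs with h1
          · rw [show ((s : Int) + (seg.length : Int)) = ((s + seg.length : Nat) : Int) by
              push_cast; ring]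
            simp
          · simp
      | cons x rest' =>
        subst hr
        have hsepx : bIsSep mi x = true := by
          have hd : (lines.drop s).dropWhile (fun l => !bIsSep mi l) = x :: rest' := hrest
          have := dropWhile_cons_prop _ _ _ _ hd
          simpa using this
        rw [segSep mi mc x hsepx]
        have hdrop' : lines.drop (s + seg.length + 1) = rest' :=
          (drop_head lines (s + seg.length) x rest' (by rw [hdroprest])).2
        have hihcast : ((s : Int) + (seg.length : Int) + 1) = ((s + seg.length + 1 : Nat) : Int) := by
          push_cast; ring
        rw [hihcast, ← hdrop', ih (s + seg.length + 1) _ (by omega)]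
        cases hp : posF mi s seg with
        | nil => simp
        | cons k tl =>
          simp only [List.length_cons, zero_add, List.head?_cons]
          split_ifs with h1
          · rw [show ((s : Int) + (seg.length : Int)) = ((s + seg.length : Nat) : Int) by
              push_cast; ring]
            simp
          · simp
    · rw [List.drop_eq_nil_of_le (by omega), bGo, dif_neg (by omega)]
      simp [aGo]

-- ===== VERDICT (by name: the statement is the Claim_ definition above) =====
theorem detect_indented_code_blocks_py_spec : Claim_equal_detect_indented_code_blocks_py := by
  intro lines mi mc _
  unfold Spec_detect_indented_code_blocks_py detect_indented_code_blocks_py detect_indented_code_blocks_py_alt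
  have := mainEq lines mi mc lines.length 0 [] (by omega)
  simpa using this
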